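-- pv_equiv track=rewrite | github.com/zuoquanGong/BiLSTM-CRF-Batch-POS-seg | BiLSTM-CRF_POS-segment2/process/utils.py | _horizontal_cut2
-- ===== SOURCE A (Python) =====
-- def _horizontal_cut2(text_lines,separator=' ',mini_cut='_'):
-- #==============================================================================
-- #     三、水平切分2
-- #     示例：新华社_NR 巴黎_NR ９月_NT １日_NT 电_NN （_PU 记者_NN 张浩_NR ）_PU
-- #==============================================================================
--     sentences=[]
--     for line in text_lines:
--         sentence={}
--         part=[[],[]]
--         sentence['part']=part
--         for team in line.strip().split(separator):
--             word,label=team.split(mini_cut)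
--             sentence['part'][0].append(word)
--             sentence['part'][1].append(label)
--         sentences.append(sentence)
--     return sentences
-- ===== SOURCE B (Python) =====
-- # B: build the full row table per line, then transpose it into the two column
-- # lists with zip, instead of appending into two lists inside the inner loop.
-- def _pair(team, mini_cut):
--     word, label = team.split(mini_cut)   # exact two-part unpack: raises on ill-formed tokens like A
--     return word, label
--
-- def _horizontal_cut2(text_lines, separator=' ', mini_cut='_'):
--     sentences = []
--     for line in text_lines:
--         rows = [_pair(team, mini_cut) for team in line.strip().split(separator)]
--         cols = [list(c) for c in zip(*rows)]
--         sentences.append({'part': [cols[0], cols[1]]})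
--     return sentences
-- ===== Notes on version B (the rewrite author's own statement) =====
-- stated objective: alternative
-- what changed: B builds the full list of (word,label) rows per line and then transposes it into the two parallel column lists, instead of A's appending into two accumulator lists inside the inner loop.
import Mathlib
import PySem

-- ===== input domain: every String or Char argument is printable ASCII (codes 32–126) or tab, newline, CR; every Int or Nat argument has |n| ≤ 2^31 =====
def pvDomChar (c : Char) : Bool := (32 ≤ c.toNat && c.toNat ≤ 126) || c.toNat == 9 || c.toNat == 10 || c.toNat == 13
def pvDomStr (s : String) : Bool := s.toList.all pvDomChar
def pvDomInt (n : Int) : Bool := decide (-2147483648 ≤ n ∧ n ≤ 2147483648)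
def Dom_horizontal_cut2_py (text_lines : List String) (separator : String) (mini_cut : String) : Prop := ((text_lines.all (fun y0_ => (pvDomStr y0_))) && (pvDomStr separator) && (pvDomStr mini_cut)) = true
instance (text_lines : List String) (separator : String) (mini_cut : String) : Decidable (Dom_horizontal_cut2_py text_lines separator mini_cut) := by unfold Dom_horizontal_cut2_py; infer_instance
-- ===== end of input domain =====

-- ===== PORT A =====
-- B changes the decomposition: a row table per line transposed into the two column
-- lists, instead of appending into two lists inside the inner loop (objective: alternative).

-- A: per line, fold over tokens appending word/label into the two lists of `part`.
-- On a token that does not split into exactly two parts Python raises ValueError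
-- (excluded by Pre_); the port keeps the state unchanged there.
def horizontal_cut2_py (text_lines : List String) (separator : String) (mini_cut : String) : List (List (String × List (List String))) :=
  text_lines.foldl (fun sentences line =>
    let part :=
      ((PySem.Str.split? (PySem.Str.strip line) separator).getD []).foldl
        (fun (p : List String × List String) team =>
          match (PySem.Str.split? team mini_cut).getD [] with
          | [word, label] => (p.1 ++ [word], p.2 ++ [label])
          | _ => p)
        ([], [])
    sentences ++ [[("part", [part.1, part.2])]]) []

-- ===== PORT B =====
-- B helper: `word, label = team.split(mini_cut)` (ValueError → excluded by Pre_).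
def pvPair (team : String) (mini_cut : String) : String × String :=
  let parts := (PySem.Str.split? team mini_cut).getD []
  (parts.getD 0 "", parts.getD 1 "")

-- B: map each line to its row table, transpose via the two projections (zip(*rows)).
def horizontal_cut2_py_alt (text_lines : List String) (separator : String) (mini_cut : String) : List (List (String × List (List String))) :=
  text_lines.map (fun line =>
    let rows := ((PySem.Str.split? (PySem.Str.strip line) separator).getD []).map
      (fun team => pvPair team mini_cut)
    [("part", [rows.map Prod.fst, rows.map Prod.snd])])

-- ===== PRECONDITION & SPEC =====
-- Pre_ excludes exactly the inputs on which A raises ValueError: a token of some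
-- line that does not split on mini_cut into exactly two parts (this also covers
-- separator = '' or mini_cut = '' on a nonempty line, where str.split raises).
def Pre_horizontal_cut2_py (text_lines : List String) (separator : String) (mini_cut : String) : Prop :=
  ∀ line ∈ text_lines, separator ≠ "" ∧ mini_cut ≠ "" ∧
    ∀ team ∈ (PySem.Str.split? (PySem.Str.strip line) separator).getD [],
      ((PySem.Str.split? team mini_cut).getD []).length = 2
instance (text_lines : List String) (separator : String) (mini_cut : String) : Decidable (Pre_horizontal_cut2_py text_lines separator mini_cut) := by unfold Pre_horizontal_cut2_py; infer_instance

def pvWitness_horizontal_cut2_py : List String × String × String := (["a_X b_Y", "c_Z"], " ", "_")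

def Spec_horizontal_cut2_py (text_lines : List String) (separator : String) (mini_cut : String) (out : List (List (String × List (List String)))) : Prop := out = horizontal_cut2_py_alt text_lines separator mini_cut
instance (text_lines : List String) (separator : String) (mini_cut : String) (out : List (List (String × List (List String)))) : Decidable (Spec_horizontal_cut2_py text_lines separator mini_cut out) := by unfold Spec_horizontal_cut2_py; infer_instance

-- ===== CLAIM (what is proved, stated in full; the proofs are below) =====
def Claim_equal_horizontal_cut2_py : Prop := ∀ (text_lines : List String) (separator : String) (mini_cut : String), Dom_horizontal_cut2_py text_lines separator mini_cut → Pre_horizontal_cut2_py text_lines separator mini_cut → Spec_horizontal_cut2_py text_lines separator mini_cut (horizontal_cut2_py text_lines separator mini_cut)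

-- ===== LEMMAS AND PROOFS =====

-- A's inner token loop equals B's row-table projections, given every token splits in two.
theorem pv_inner (mini_cut : String) (tokens : List String)
    (h : ∀ team ∈ tokens, ((PySem.Str.split? team mini_cut).getD []).length = 2)
    (a b : List String) :
    tokens.foldl
      (fun (p : List String × List String) team =>
        match (PySem.Str.split? team mini_cut).getD [] with
        | [word, label] => (p.1 ++ [word], p.2 ++ [label])
        | _ => p)
      (a, b)
    = (a ++ (tokens.map (fun t => pvPair t mini_cut)).map Prod.fst,
       b ++ (tokens.map (fun t => pvPair t mini_cut)).map Prod.snd) := by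
  induction tokens generalizing a b with
  | nil => simp
  | cons t ts ih =>
    have ht := h t (by simp)
    obtain ⟨w, l, hwl⟩ : ∃ w l, (PySem.Str.split? t mini_cut).getD [] = [w, l] := by
      match hx : (PySem.Str.split? t mini_cut).getD [] with
      | [w, l] => exact ⟨w, l, rfl⟩
      | [] => simp [hx] at ht
      | [_] => simp [hx] at ht
      | _ :: _ :: _ :: _ => simp [hx] at ht
    have hp : pvPair t mini_cut = (w, l) := by simp [pvPair, hwl]
    simp only [List.foldl_cons, List.map_cons, hwl, hp]
    rw [ih (fun x hx => h x (by simp [hx]))]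
    simp

theorem horizontal_cut2_py_spec_aux (text_lines : List String) (separator mini_cut : String)
    (hpre : Pre_horizontal_cut2_py text_lines separator mini_cut) (acc : List (List (String × List (List String)))) :
    text_lines.foldl (fun sentences line =>
      let part :=
        ((PySem.Str.split? (PySem.Str.strip line) separator).getD []).foldl
          (fun (p : List String × List String) team =>
            match (PySem.Str.split? team mini_cut).getD [] with
            | [word, label] => (p.1 ++ [word], p.2 ++ [label])
            | _ => p)
          ([], [])
      sentences ++ [[("part", [part.1, part.2])]]) acc
    = acc ++ horizontal_cut2_py_alt text_lines separator mini_cut := by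
  induction text_lines generalizing acc with
  | nil => simp [horizontal_cut2_py_alt]
  | cons line rest ih =>
    have hline := hpre line (by simp)
    have hrest : Pre_horizontal_cut2_py rest separator mini_cut :=
      fun l hl => hpre l (by simp [hl])
    simp only [List.foldl_cons]
    rw [ih hrest]
    simp [horizontal_cut2_py_alt, pv_inner mini_cut _ hline.2.2 [] []]

-- ===== VERDICT (by name: the statement is the Claim_ definition above) =====
theorem horizontal_cut2_py_spec : Claim_equal_horizontal_cut2_py := by
  intro text_lines separator mini_cut _ hpre
  unfold Spec_horizontal_cut2_py horizontal_cut2_py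
  rw [horizontal_cut2_py_spec_aux text_lines separator mini_cut hpre []]
  simp
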